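-- pv_equiv track=rewrite | github.com/pfptcommunity/senderstats | src/senderstats/common/address_tools.py | remove_prvs_batch
-- ===== SOURCE A (Python) =====
-- from typing import Iterable, List
--
-- def remove_prvs_batch(emails: Iterable[str]) -> list[str]:
--     out: list[str] = []
--     ap = out.append
--     for email in emails:
--         if not email:
--             ap(email)
--             continue
--
--         at = email.find("@")
--         if at < 0:
--             ap(email)
--             continue
--
--         if not (email.startswith("prvs") or email.startswith("msprvs")):
--             ap(email)
--             continue
--
--         local = email[:at]
--         first = local.find("=")
--         if first < 0:
--             ap(email)
--             continue
--         second = local.find("=", first + 1)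
--         if second < 0:
--             ap(email)
--             continue
--
--         orig_local = local[second + 1:]
--         # Reject empty/garbage originals (e.g. "msprvs=deadbeef==@example.com")
--         if not orig_local or orig_local[0] == "=":
--             ap(email)
--             continue
--
--         ap(orig_local + email[at:])
--     return out
-- ===== SOURCE B (Python) =====
-- def _detag(email: str) -> str:
--     # Single left-to-right character scan: count the first two '=' signs, remember the
--     # index just past the second one, and decide at the first '@'.
--     if not email.startswith(("prvs", "msprvs")):
--         return email
--     eqs = 0
--     cut = -1
--     for i, ch in enumerate(email):
--         if ch == "@":
--             if 0 <= cut < i and email[cut] != "=":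
--                 return email[cut:]
--             return email
--         if ch == "=" and eqs < 2:
--             eqs += 1
--             if eqs == 2:
--                 cut = i + 1
--     return email
--
--
-- def remove_prvs_batch(emails):
--     return [_detag(e) for e in emails]
-- ===== Notes on version B (the rewrite author's own statement) =====
-- stated objective: alternative
-- what changed: Replaces A's find/startswith/slice guard chain per email by a single left-to-right character scan (state machine counting the first two '=' signs and deciding at the first '@'), emitting one suffix slice email[cut:] instead of concatenating local-part pieces.
import Mathlib
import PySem

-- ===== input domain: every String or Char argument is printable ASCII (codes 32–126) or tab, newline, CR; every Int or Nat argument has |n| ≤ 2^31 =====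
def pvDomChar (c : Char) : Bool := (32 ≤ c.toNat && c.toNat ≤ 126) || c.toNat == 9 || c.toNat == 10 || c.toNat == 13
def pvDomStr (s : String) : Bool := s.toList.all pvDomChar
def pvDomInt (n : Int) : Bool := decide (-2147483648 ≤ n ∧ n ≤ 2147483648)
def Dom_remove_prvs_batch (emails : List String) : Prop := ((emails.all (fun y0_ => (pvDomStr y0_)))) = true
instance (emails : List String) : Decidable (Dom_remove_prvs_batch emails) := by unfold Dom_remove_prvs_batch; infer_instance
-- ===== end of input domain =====

-- B replaces A's find/startswith/slice guard chain by a single left-to-right character scan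
-- per email (a small state machine) emitting one suffix slice; same cost, alternative algorithm.

-- ===== PORT A =====
def pvStripA (email : String) : String :=
  if email = "" then email
  else
    let at_ := PySem.Str.find email "@"
    if at_ < 0 then email
    else if !(PySem.Str.startswith email "prvs" || PySem.Str.startswith email "msprvs") then email
    else
      let lcl := PySem.Str.slice email none (some at_)
      let first := PySem.Str.find lcl "="
      if first < 0 then email
      else
        let second := PySem.Str.findFrom lcl "=" (first + 1) none
        if second < 0 then email
        else
          let orig := PySem.Str.slice lcl (some (second + 1)) none
          if orig = "" || (PySem.Str.pyGet? orig 0 == some '=') then email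
          else orig ++ PySem.Str.slice email (some at_) none

def remove_prvs_batch (emails : List String) : List String :=
  emails.foldl (fun out email => out ++ [pvStripA email]) []

-- ===== PORT B =====
-- the `for i, ch in enumerate(email)` scan of Source B's _detag, with its (eqs, cut) state
def pvScanB (email : String) : List Char → Nat → Nat → Int → String
  | [], _, _, _ => email
  | c :: rest, i, eqs, cut =>
    if c = '@' then
      if 0 ≤ cut ∧ cut < (i : Int) ∧ ¬ (PySem.Str.pyGet? email cut = some '=') then
        PySem.Str.slice email (some cut) none
      else email
    else if c = '=' ∧ eqs < 2 then
      pvScanB email rest (i + 1) (eqs + 1) (if eqs + 1 = 2 then (i : Int) + 1 else cut)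
    else
      pvScanB email rest (i + 1) eqs cut

def pvStripB (email : String) : String :=
  if !(PySem.Str.startswith email "prvs" || PySem.Str.startswith email "msprvs") then email
  else pvScanB email email.toList 0 0 (-1)

def remove_prvs_batch_alt (emails : List String) : List String :=
  emails.map pvStripB

-- ===== PRECONDITION & SPEC =====
def Spec_remove_prvs_batch (emails : List String) (out : List String) : Prop := out = remove_prvs_batch_alt emails
instance (emails : List String) (out : List String) : Decidable (Spec_remove_prvs_batch emails out) := by unfold Spec_remove_prvs_batch; infer_instance

-- ===== CLAIM (what is proved, stated in full; the proofs are below) =====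
def Claim_equal_remove_prvs_batch : Prop := ∀ (emails : List String), Dom_remove_prvs_batch emails → Spec_remove_prvs_batch emails (remove_prvs_batch emails)

-- ===== LEMMAS AND PROOFS =====

-- shorthands for the pieces both proofs speak about
def pvTW (l : List Char) : List Char := l.takeWhile (fun c => c != '@')
def pvAfterAt (l : List Char) : List Char := (l.dropWhile (fun c => c != '@')).tail
def pvR1 (p : List Char) : List Char := (p.dropWhile (fun c => c != '=')).tail

-- common reference function both per-email bodies are proved equal to
def pvSpecStrip (e : String) : String :=
  if ('@' ∈ e.toList)
      ∧ (PySem.Str.startswith e "prvs" || PySem.Str.startswith e "msprvs") = true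
      ∧ '=' ∈ pvTW e.toList
      ∧ '=' ∈ pvR1 (pvTW e.toList)
      ∧ pvR1 (pvR1 (pvTW e.toList)) ≠ []
      ∧ (pvR1 (pvR1 (pvTW e.toList))).head? ≠ some '='
  then String.ofList (pvR1 (pvR1 (pvTW e.toList)) ++ '@' :: pvAfterAt e.toList)
  else e

-- spec returns the input unchanged when the prefix test fails
lemma pvSpec_noPrefix (e : String)
    (hp : (PySem.Str.startswith e "prvs" || PySem.Str.startswith e "msprvs") = false) :
    pvSpecStrip e = e := by
  rw [pvSpecStrip, if_neg]
  intro hcon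
  rw [hcon.2.1] at hp
  simp at hp

-- find.go for a single-character needle
lemma pvFindGo (a : Char) (cs : List Char) (k : Nat) :
    PySem.Chars.find.go [a] cs k =
      if a ∈ cs then (k : Int) + ((cs.takeWhile (fun c => c != a)).length : Int) else -1 := by
  induction cs generalizing k with
  | nil => simp [PySem.Chars.find.go]
  | cons c t ih =>
    by_cases hca : c = a
    · subst hca
      simp [PySem.Chars.find.go, List.isPrefixOf]
    · have hac : ¬ (a = c) := fun h => hca h.symm
      have h1 : ([a].isPrefixOf (c :: t)) = false := by
        simp [List.isPrefixOf]; exact hac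
      rw [PySem.Chars.find.go, h1]
      simp only [Bool.false_eq_true, if_false, ih (k + 1)]
      by_cases hm : a ∈ t
      · have hmem : a ∈ c :: t := List.mem_cons_of_mem _ hm
        simp [hm, hmem, hca]
        ring
      · have hnm : a ∉ c :: t := by simp [hac, hm]
        simp [hm, hnm]

lemma pvFind (a : Char) (cs : List Char) :
    PySem.Chars.find cs [a] =
      if a ∈ cs then ((cs.takeWhile (fun c => c != a)).length : Int) else -1 := by
  rw [PySem.Chars.find, pvFindGo]
  simp

-- findFrom with a Nat start and no end, for a single-character needle
lemma pvFindFrom (l : List Char) (k : Nat) (hk : k ≤ l.length) :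
    PySem.Chars.findFrom l ['='] ((k : Nat) : Int) none =
      (if '=' ∈ l.drop k then ((k : Int) + (((l.drop k).takeWhile (fun c => c != '=')).length : Int)) else -1) := by
  unfold PySem.Chars.findFrom
  simp only
  rw [if_neg (show ¬ (((k : Nat) : Int) < 0) by omega)]
  rw [if_neg (show ¬ (((l.length : Nat) : Int) < ((k : Nat) : Int)) by omega)]
  rw [Int.toNat_natCast, Int.toNat_natCast, List.take_length, pvFind]
  by_cases hm : '=' ∈ l.drop k
  · rw [if_pos hm, if_pos hm,
      if_neg (show ¬ ((((l.drop k).takeWhile (fun c => c != '=')).length : Int) = -1) by omega)]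
  · rw [if_neg hm, if_neg hm, if_pos rfl]

-- decomposition of a list at the first occurrence of a
lemma pvDecomp (a : Char) : ∀ l : List Char, a ∈ l →
    l = l.takeWhile (fun c => c != a) ++ a :: (l.dropWhile (fun c => c != a)).tail := by
  intro l
  induction l with
  | nil => intro h; simp at h
  | cons c t ih =>
    intro h
    by_cases hca : c = a
    · subst hca
      simp
    · have hac : ¬ (a = c) := fun hx => hca hx.symm
      have hat : a ∈ t := by
        rcases List.mem_cons.mp h with h1 | h2
        · exact absurd h1 hac
        · exact h2
      have hb : (c != a) = true := by simp [hca]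
      simp only [List.takeWhile_cons, List.dropWhile_cons, hb, if_true, List.cons_append]
      exact congrArg (List.cons c) (ih hat)

-- drop just past the first occurrence of a
lemma pvDropAt (a : Char) (l : List Char) (h : a ∈ l) :
    l.drop ((l.takeWhile (fun c => c != a)).length + 1) = (l.dropWhile (fun c => c != a)).tail := by
  have key : ∀ (tw rest : List Char), (tw ++ a :: rest).drop (tw.length + 1) = rest := by
    intro tw rest
    rw [show tw ++ a :: rest = (tw ++ [a]) ++ rest by simp]
    rw [show tw.length + 1 = (tw ++ [a]).length by simp]
    exact List.drop_left
  have h' := key (l.takeWhile (fun c => c != a)) ((l.dropWhile (fun c => c != a)).tail)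
  rw [← pvDecomp a l h] at h'
  exact h'

lemma pvStrEmpty (s : String) : (s = "") ↔ s.toList = [] := by
  constructor
  · intro h; rw [h]; rfl
  · intro h
    have : s.toList = ("" : String).toList := by simpa using h
    exact String.toList_inj.mp this

lemma pvAt : ("@" : String).toList = ['@'] := by simp

lemma pvEq1 : ("=" : String).toList = ['='] := by simp

-- length bookkeeping for the decomposed local part
lemma pvTWlen (e : String) (h1 : '=' ∈ pvTW e.toList) (h2 : '=' ∈ pvR1 (pvTW e.toList)) :
    (pvTW e.toList).length =
      ((pvTW e.toList).takeWhile (fun c => c != '=')).length + 1 +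
      (((pvR1 (pvTW e.toList)).takeWhile (fun c => c != '=')).length + 1) +
      (pvR1 (pvR1 (pvTW e.toList))).length := by
  have d1 := pvDecomp '=' (pvTW e.toList) h1
  have d2 := pvDecomp '=' (pvR1 (pvTW e.toList)) h2
  unfold pvR1 at *
  conv_lhs => rw [d1]
  conv_lhs => rw [show ((pvTW e.toList).dropWhile (fun c => c != '=')).tail =
    (((pvTW e.toList).dropWhile (fun c => c != '=')).tail).takeWhile (fun c => c != '=') ++
      '=' :: ((((pvTW e.toList).dropWhile (fun c => c != '=')).tail).dropWhile (fun c => c != '=')).tail from d2]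
  simp only [List.length_append, List.length_cons]
  omega

-- drop past the second '=' of the local part
lemma pvDropOrig (e : String) (h1 : '=' ∈ pvTW e.toList) (h2 : '=' ∈ pvR1 (pvTW e.toList)) :
    (pvTW e.toList).drop
        (((pvTW e.toList).takeWhile (fun c => c != '=')).length + 1 +
         (((pvR1 (pvTW e.toList)).takeWhile (fun c => c != '=')).length + 1)) =
      pvR1 (pvR1 (pvTW e.toList)) := by
  rw [← List.drop_drop]
  rw [pvDropAt '=' (pvTW e.toList) h1]
  rw [show ((pvTW e.toList).dropWhile (fun c => c != '=')).tail = pvR1 (pvTW e.toList) from rfl]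
  rw [pvDropAt '=' (pvR1 (pvTW e.toList)) h2]
  rfl

-- ===== A = spec =====
lemma pvA_eq_spec (e : String) : pvStripA e = pvSpecStrip e := by
  by_cases hat : '@' ∈ e.toList
  · have hne : ¬ (e = "") := by
      intro h0; rw [pvStrEmpty] at h0; rw [h0] at hat; simp at hat
    have hdec : e.toList = pvTW e.toList ++ '@' :: pvAfterAt e.toList :=
      pvDecomp '@' e.toList hat
    have hfind : PySem.Str.find e "@" = (((pvTW e.toList).length : Nat) : Int) := by
      rw [PySem.Str.find, pvAt, pvFind]
      simp [hat, pvTW]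
    have hlcl : PySem.Str.slice e none (some (((pvTW e.toList).length : Nat) : Int)) =
        String.ofList (pvTW e.toList) := by
      rw [PySem.Str.slice]
      apply congrArg
      rw [PySem.Chars.slice_eq_listSlice, PySem.List.slice_to_natCast]
      have h' : List.take (pvTW e.toList).length (pvTW e.toList ++ '@' :: pvAfterAt e.toList) = pvTW e.toList := List.take_left
      rw [← hdec] at h'
      exact h'
    have hrest : PySem.Str.slice e (some (((pvTW e.toList).length : Nat) : Int)) none =
        String.ofList ('@' :: pvAfterAt e.toList) := by
      rw [PySem.Str.slice]
      apply congrArg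
      rw [PySem.Chars.slice_eq_listSlice, PySem.List.slice_from_natCast]
      have h' : List.drop (pvTW e.toList).length (pvTW e.toList ++ '@' :: pvAfterAt e.toList) = '@' :: pvAfterAt e.toList := List.drop_left
      rw [← hdec] at h'
      exact h'
    simp only [pvStripA]
    rw [if_neg hne, hfind]
    rw [if_neg (show ¬ ((((pvTW e.toList).length : Nat) : Int) < 0) by omega)]
    cases hp : (PySem.Str.startswith e "prvs" || PySem.Str.startswith e "msprvs") with
    | false =>
      rw [pvSpec_noPrefix e hp]
      simp
    | true =>
      simp only [Bool.not_true, Bool.false_eq_true, if_false]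
      rw [hlcl]
      by_cases h1 : '=' ∈ pvTW e.toList
      · have hfind1 : PySem.Str.find (String.ofList (pvTW e.toList)) "=" =
            ((((pvTW e.toList).takeWhile (fun c => c != '=')).length : Nat) : Int) := by
          rw [PySem.Str.find, pvEq1]
          simp only [String.toList_ofList]
          rw [pvFind]; simp [h1]
        rw [hfind1]
        rw [if_neg (show ¬ (((((pvTW e.toList).takeWhile (fun c => c != '=')).length : Nat) : Int) < 0) by omega)]
        by_cases h2 : '=' ∈ pvR1 (pvTW e.toList)
        · have hlen := pvTWlen e h1 h2
          have hsecond : PySem.Str.findFrom (String.ofList (pvTW e.toList)) "="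
              (((((pvTW e.toList).takeWhile (fun c => c != '=')).length : Nat) : Int) + 1) none
              = ((((pvTW e.toList).takeWhile (fun c => c != '=')).length : Nat) : Int) + 1 +
                ((((pvR1 (pvTW e.toList)).takeWhile (fun c => c != '=')).length : Nat) : Int) := by
            have hd1 := pvDecomp '=' (pvTW e.toList) h1
            have hklen : ((pvTW e.toList).takeWhile (fun c => c != '=')).length + 1 ≤ (pvTW e.toList).length := by
              have := congrArg List.length hd1
              simp only [List.length_append, List.length_cons] at this
              omega
            rw [PySem.Str.findFrom, pvEq1]
            simp only [String.toList_ofList]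
            rw [show ((((pvTW e.toList).takeWhile (fun c => c != '=')).length : Nat) : Int) + 1 =
              ((((pvTW e.toList).takeWhile (fun c => c != '=')).length + 1 : Nat) : Int) by push_cast; ring]
            rw [pvFindFrom _ _ hklen]
            rw [pvDropAt '=' (pvTW e.toList) h1]
            rw [show ((pvTW e.toList).dropWhile (fun c => c != '=')).tail = pvR1 (pvTW e.toList) from rfl]
            rw [if_pos h2]
          rw [hsecond]
          rw [if_neg (show ¬ ((↑(List.takeWhile (fun c => c != '=') (pvTW e.toList)).length : Int) + 1 +
            (↑(List.takeWhile (fun c => c != '=') (pvR1 (pvTW e.toList))).length : Int) < 0) by omega)]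
          have horig : PySem.Str.slice (String.ofList (pvTW e.toList))
              (some (((((pvTW e.toList).takeWhile (fun c => c != '=')).length : Nat) : Int) + 1 +
                ((((pvR1 (pvTW e.toList)).takeWhile (fun c => c != '=')).length : Nat) : Int) + 1)) none
              = String.ofList (pvR1 (pvR1 (pvTW e.toList))) := by
            rw [PySem.Str.slice]
            apply congrArg
            simp only [String.toList_ofList]
            rw [PySem.Chars.slice_eq_listSlice]
            rw [show ((((pvTW e.toList).takeWhile (fun c => c != '=')).length : Nat) : Int) + 1 +
                ((((pvR1 (pvTW e.toList)).takeWhile (fun c => c != '=')).length : Nat) : Int) + 1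
              = ((((pvTW e.toList).takeWhile (fun c => c != '=')).length + 1 +
                 (((pvR1 (pvTW e.toList)).takeWhile (fun c => c != '=')).length + 1) : Nat) : Int) by push_cast; ring]
            rw [PySem.List.slice_from_natCast]
            exact pvDropOrig e h1 h2
          rw [horig]
          -- guard on orig
          by_cases ho : pvR1 (pvR1 (pvTW e.toList)) = []
          · have : String.ofList (pvR1 (pvR1 (pvTW e.toList))) = "" := by
              rw [pvStrEmpty]; simp [ho]
            rw [if_pos (by simp [this])]
            simp [pvSpecStrip, ho]
          · cases horigl : pvR1 (pvR1 (pvTW e.toList)) with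
            | nil => exact absurd horigl ho
            | cons c cs =>
              have hnemp : ¬ (String.ofList (c :: cs) = "") := by rw [pvStrEmpty]; simp
              by_cases hc : c = '='
              · subst hc
                rw [if_pos (by simp [PySem.Str.pyGet?])]
                rw [pvSpecStrip, if_neg (by intro hcon; exact hcon.2.2.2.2.2 (by simp [horigl]))]
              · rw [if_neg (by simp [hnemp, hc, PySem.Str.pyGet?])]
                rw [hrest]
                have hcond : ('@' ∈ e.toList)
                    ∧ (PySem.Str.startswith e "prvs" || PySem.Str.startswith e "msprvs") = true
                    ∧ '=' ∈ pvTW e.toList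
                    ∧ '=' ∈ pvR1 (pvTW e.toList)
                    ∧ pvR1 (pvR1 (pvTW e.toList)) ≠ []
                    ∧ (pvR1 (pvR1 (pvTW e.toList))).head? ≠ some '=' := by
                  refine ⟨hat, hp, h1, h2, ho, ?_⟩
                  rw [horigl]; simp [hc]
                rw [pvSpecStrip, if_pos hcond, horigl]
                exact String.toList_inj.mp (by simp)
        · have hsecond0 : PySem.Str.findFrom (String.ofList (pvTW e.toList)) "="
              (((((pvTW e.toList).takeWhile (fun c => c != '=')).length : Nat) : Int) + 1) none
              = (-1 : Int) := by
            have hd1 := pvDecomp '=' (pvTW e.toList) h1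
            have hklen : ((pvTW e.toList).takeWhile (fun c => c != '=')).length + 1 ≤ (pvTW e.toList).length := by
              have := congrArg List.length hd1
              simp only [List.length_append, List.length_cons] at this
              omega
            rw [PySem.Str.findFrom, pvEq1]
            simp only [String.toList_ofList]
            rw [show ((((pvTW e.toList).takeWhile (fun c => c != '=')).length : Nat) : Int) + 1 =
              ((((pvTW e.toList).takeWhile (fun c => c != '=')).length + 1 : Nat) : Int) by push_cast; ring]
            rw [pvFindFrom _ _ hklen]
            rw [pvDropAt '=' (pvTW e.toList) h1]
            rw [show ((pvTW e.toList).dropWhile (fun c => c != '=')).tail = pvR1 (pvTW e.toList) from rfl]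
            rw [if_neg h2]
          rw [hsecond0, if_pos (by norm_num)]
          simp [pvSpecStrip, h2]
      · have hfind1 : PySem.Str.find (String.ofList (pvTW e.toList)) "=" = (-1 : Int) := by
          rw [PySem.Str.find, pvEq1]
          simp only [String.toList_ofList]
          rw [pvFind]; simp [h1]
        rw [hfind1, if_pos (by norm_num)]
        simp [pvSpecStrip, h1]
  · have hfindA : PySem.Str.find e "@" = (-1 : Int) := by
      rw [PySem.Str.find, pvAt, pvFind]
      simp [hat]
    by_cases hne : e = ""
    · simp [pvStripA, pvSpecStrip, hne]
    · simp only [pvStripA]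
      rw [if_neg hne, hfindA, if_pos (by norm_num)]
      simp [pvSpecStrip, hat]

-- ===== B = spec =====

-- the pure state transformer of the scan (index, eqs, cut)
def pvFoldSt : List Char → (Nat × Nat × Int) → (Nat × Nat × Int)
  | [], s => s
  | c :: rest, (i, eqs, cut) =>
    if c = '=' ∧ eqs < 2 then
      pvFoldSt rest (i + 1, eqs + 1, if eqs + 1 = 2 then (i : Int) + 1 else cut)
    else
      pvFoldSt rest (i + 1, eqs, cut)

lemma pvScan_noAt (email : String) : ∀ (p : List Char), '@' ∉ p → ∀ i eqs cut,
    pvScanB email p i eqs cut = email := by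
  intro p
  induction p with
  | nil => intro _ i eqs cut; rfl
  | cons c rest ih =>
    intro h i eqs cut
    have hc : ¬ (c = '@') := fun hx => h (hx ▸ List.mem_cons_self)
    have hr : '@' ∉ rest := fun hx => h (List.mem_cons_of_mem _ hx)
    rw [pvScanB, if_neg hc]
    split
    · exact ih hr _ _ _
    · exact ih hr _ _ _

lemma pvScan_append (email : String) : ∀ (p xs : List Char), '@' ∉ p → ∀ i eqs cut,
    pvScanB email (p ++ xs) i eqs cut =
      pvScanB email xs (pvFoldSt p (i, eqs, cut)).1 (pvFoldSt p (i, eqs, cut)).2.1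
        (pvFoldSt p (i, eqs, cut)).2.2 := by
  intro p
  induction p with
  | nil => intro xs _ i eqs cut; rfl
  | cons c rest ih =>
    intro xs h i eqs cut
    have hc : ¬ (c = '@') := fun hx => h (hx ▸ List.mem_cons_self)
    have hr : '@' ∉ rest := fun hx => h (List.mem_cons_of_mem _ hx)
    rw [List.cons_append, pvScanB, if_neg hc, pvFoldSt]
    split
    · exact ih xs hr _ _ _
    · exact ih xs hr _ _ _

lemma pvFold_append : ∀ (p q : List Char) (s : Nat × Nat × Int),
    pvFoldSt (p ++ q) s = pvFoldSt q (pvFoldSt p s) := by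
  intro p
  induction p with
  | nil => intro q s; rfl
  | cons c rest ih =>
    intro q s
    obtain ⟨i, eqs, cut⟩ := s
    rw [List.cons_append, pvFoldSt, pvFoldSt]
    split
    · exact ih q _
    · exact ih q _

lemma pvFold_noEq : ∀ (p : List Char), '=' ∉ p → ∀ i eqs cut,
    pvFoldSt p (i, eqs, cut) = (i + p.length, eqs, cut) := by
  intro p
  induction p with
  | nil => intro _ i eqs cut; simp [pvFoldSt]
  | cons c rest ih =>
    intro h i eqs cut
    have hc : ¬ (c = '=') := fun hx => h (hx ▸ List.mem_cons_self)
    have hr : '=' ∉ rest := fun hx => h (List.mem_cons_of_mem _ hx)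
    rw [pvFoldSt, if_neg (by exact fun hx => hc hx.1)]
    rw [ih hr]
    simp; omega

lemma pvFold_sat : ∀ (p : List Char), ∀ i cut,
    pvFoldSt p (i, 2, cut) = (i + p.length, 2, cut) := by
  intro p
  induction p with
  | nil => intro i cut; simp [pvFoldSt]
  | cons c rest ih =>
    intro i cut
    rw [pvFoldSt, if_neg (by intro h; exact absurd h.2 (by omega))]
    rw [ih]
    simp; omega

lemma pvB_eq_spec (e : String) : pvStripB e = pvSpecStrip e := by
  rw [pvStripB]
  cases hp : (PySem.Str.startswith e "prvs" || PySem.Str.startswith e "msprvs") with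
  | false => simp [pvSpec_noPrefix e hp]
  | true =>
    simp only [Bool.not_true, Bool.false_eq_true, if_false]
    by_cases hat : '@' ∈ e.toList
    · have hdec : e.toList = pvTW e.toList ++ '@' :: pvAfterAt e.toList :=
        pvDecomp '@' e.toList hat
      have htwAt : '@' ∉ pvTW e.toList := by
        intro hx
        have := List.mem_takeWhile_imp hx
        simp at this
      conv_lhs => rw [hdec]
      rw [pvScan_append e _ _ htwAt]
      by_cases h1 : '=' ∈ pvTW e.toList
      · have d1 := pvDecomp '=' (pvTW e.toList) h1
        by_cases h2 : '=' ∈ pvR1 (pvTW e.toList)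
        · have d2 := pvDecomp '=' (pvR1 (pvTW e.toList)) h2
          have hT1 : '=' ∉ (pvTW e.toList).takeWhile (fun c => c != '=') := by
            intro hx
            have := List.mem_takeWhile_imp hx; simp at this
          have hT2 : '=' ∉ (pvR1 (pvTW e.toList)).takeWhile (fun c => c != '=') := by
            intro hx
            have := List.mem_takeWhile_imp hx; simp at this
          have hfold : pvFoldSt (pvTW e.toList) (0, 0, -1) =
              ((pvTW e.toList).length, 2,
               ((((pvTW e.toList).takeWhile (fun c => c != '=')).length +
                 ((pvR1 (pvTW e.toList)).takeWhile (fun c => c != '=')).length + 2 : Nat) : Int)) := by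
            conv_lhs => rw [d1]
            rw [pvFold_append, pvFold_noEq _ hT1]
            rw [show ((pvTW e.toList).dropWhile (fun c => c != '=')).tail = pvR1 (pvTW e.toList) from rfl] at d1 ⊢
            conv_lhs => rw [show ('=' :: pvR1 (pvTW e.toList) : List Char) = ['='] ++ pvR1 (pvTW e.toList) from rfl]
            rw [pvFold_append]
            rw [show pvFoldSt ['='] (0 + ((pvTW e.toList).takeWhile (fun c => c != '=')).length, 0, -1)
              = (((pvTW e.toList).takeWhile (fun c => c != '=')).length + 1, 1, -1) by
                simp [pvFoldSt]]
            conv_lhs => rw [d2]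
            rw [pvFold_append, pvFold_noEq _ hT2]
            rw [show (List.dropWhile (fun c => c != '=') (pvR1 (pvTW e.toList))).tail = pvR1 (pvR1 (pvTW e.toList)) from rfl]
            conv_lhs => rw [show ('=' :: pvR1 (pvR1 (pvTW e.toList)) : List Char) = ['='] ++ pvR1 (pvR1 (pvTW e.toList)) from rfl]
            rw [pvFold_append]
            rw [show pvFoldSt ['=']
                (((pvTW e.toList).takeWhile (fun c => c != '=')).length + 1 +
                  ((pvR1 (pvTW e.toList)).takeWhile (fun c => c != '=')).length, 1, -1)
              = (((pvTW e.toList).takeWhile (fun c => c != '=')).length + 1 +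
                  ((pvR1 (pvTW e.toList)).takeWhile (fun c => c != '=')).length + 1, 2,
                 ((((pvTW e.toList).takeWhile (fun c => c != '=')).length + 1 +
                   ((pvR1 (pvTW e.toList)).takeWhile (fun c => c != '=')).length : Nat) : Int) + 1) by
                simp [pvFoldSt]]
            rw [pvFold_sat]
            have hlen := pvTWlen e h1 h2
            simp only [Prod.mk.injEq]
            exact ⟨by omega, by trivial, by omega⟩
          rw [hfold]
          -- now the single step at '@'
          show pvScanB e ('@' :: pvAfterAt e.toList) (pvTW e.toList).length 2
            (((((pvTW e.toList).takeWhile (fun c => c != '=')).length +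
               ((pvR1 (pvTW e.toList)).takeWhile (fun c => c != '=')).length + 2 : Nat) : Int)) = pvSpecStrip e
          rw [pvScanB, if_pos rfl]
          have hlen := pvTWlen e h1 h2
          set n : Nat := ((pvTW e.toList).takeWhile (fun c => c != '=')).length +
            ((pvR1 (pvTW e.toList)).takeWhile (fun c => c != '=')).length + 2 with hn
          have hdropn : e.toList.drop n = pvR1 (pvR1 (pvTW e.toList)) ++ '@' :: pvAfterAt e.toList := by
            conv_lhs => rw [hdec]
            rw [List.drop_append_of_le_length (by omega)]
            rw [show (pvTW e.toList).drop n = pvR1 (pvR1 (pvTW e.toList)) by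
              rw [show n = ((pvTW e.toList).takeWhile (fun c => c != '=')).length + 1 +
                (((pvR1 (pvTW e.toList)).takeWhile (fun c => c != '=')).length + 1) by omega]
              exact pvDropOrig e h1 h2]
          have hget : PySem.Str.pyGet? e ((n : Nat) : Int) = (e.toList.drop n).head? := by
            rw [PySem.Str.pyGet?]
            simp only [PySem.Chars.pyGet?_eq_listPyGet?, PySem.List.pyGet?_natCast]
            rw [← List.head?_drop]
          by_cases ho : pvR1 (pvR1 (pvTW e.toList)) = []
          · rw [if_neg (by
              intro hcon
              have := hcon.2.1
              simp [ho] at hlen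
              omega)]
            simp [pvSpecStrip, ho]
          · cases horigl : pvR1 (pvR1 (pvTW e.toList)) with
            | nil => exact absurd horigl ho
            | cons c cs =>
              have hhead : (e.toList.drop n).head? = some c := by
                rw [hdropn, horigl]; rfl
              by_cases hc : c = '='
              · subst hc
                rw [if_neg (by
                  intro hcon
                  exact hcon.2.2 (by rw [hget, hhead]))]
                simp [pvSpecStrip, horigl]
              · rw [if_pos (by
                  refine ⟨by positivity, by
                    rw [horigl] at hlen
                    simp at hlen
                    omega, by
                    rw [hget, hhead]
                    simp [hc]⟩)]
                have hcond : ('@' ∈ e.toList)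
                    ∧ (PySem.Str.startswith e "prvs" || PySem.Str.startswith e "msprvs") = true
                    ∧ '=' ∈ pvTW e.toList
                    ∧ '=' ∈ pvR1 (pvTW e.toList)
                    ∧ pvR1 (pvR1 (pvTW e.toList)) ≠ []
                    ∧ (pvR1 (pvR1 (pvTW e.toList))).head? ≠ some '=' := by
                  refine ⟨hat, hp, h1, h2, ho, ?_⟩
                  rw [horigl]; simp [hc]
                rw [pvSpecStrip, if_pos hcond]
                rw [PySem.Str.slice]
                apply congrArg
                rw [PySem.Chars.slice_eq_listSlice, PySem.List.slice_from_natCast]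
                rw [hdropn, horigl]
        · have hT1 : '=' ∉ (pvTW e.toList).takeWhile (fun c => c != '=') := by
            intro hx
            have := List.mem_takeWhile_imp hx; simp at this
          have hfold : pvFoldSt (pvTW e.toList) (0, 0, -1) =
              ((pvTW e.toList).length, 1, -1) := by
            conv_lhs => rw [d1]
            rw [pvFold_append, pvFold_noEq _ hT1]
            rw [show (List.dropWhile (fun c => c != '=') (pvTW e.toList)).tail = pvR1 (pvTW e.toList) from rfl]
            conv_lhs => rw [show ('=' :: pvR1 (pvTW e.toList) : List Char) = ['='] ++ pvR1 (pvTW e.toList) from rfl]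
            rw [pvFold_append]
            rw [show pvFoldSt ['='] (0 + ((pvTW e.toList).takeWhile (fun c => c != '=')).length, 0, -1)
              = (((pvTW e.toList).takeWhile (fun c => c != '=')).length + 1, 1, -1) by
                simp [pvFoldSt]]
            rw [pvFold_noEq _ h2]
            have hl1 : (pvTW e.toList).length =
                ((pvTW e.toList).takeWhile (fun c => c != '=')).length + 1 + (pvR1 (pvTW e.toList)).length := by
              have h' := congrArg List.length d1
              simp only [List.length_append, List.length_cons] at h'
              rw [show (List.dropWhile (fun c => c != '=') (pvTW e.toList)).tail = pvR1 (pvTW e.toList) from rfl] at h'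
              omega
            simp only [Prod.mk.injEq, and_true]
            omega
          rw [hfold]
          show pvScanB e ('@' :: pvAfterAt e.toList) (pvTW e.toList).length 1 (-1) = pvSpecStrip e
          rw [pvScanB, if_pos rfl]
          rw [if_neg (by intro hcon; have := hcon.1; omega)]
          simp [pvSpecStrip, h2]
      · have hfold : pvFoldSt (pvTW e.toList) (0, 0, -1) =
            ((pvTW e.toList).length, 0, -1) := by
          rw [pvFold_noEq _ h1]; simp
        rw [hfold]
        show pvScanB e ('@' :: pvAfterAt e.toList) (pvTW e.toList).length 0 (-1) = pvSpecStrip e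
        rw [pvScanB, if_pos rfl]
        rw [if_neg (by intro hcon; have := hcon.1; omega)]
        simp [pvSpecStrip, h1]
    · rw [pvScan_noAt e _ hat]
      simp [pvSpecStrip, hat]

theorem pv_main : ∀ emails : List String, remove_prvs_batch emails = remove_prvs_batch_alt emails := by
  intro emails
  rw [remove_prvs_batch, remove_prvs_batch_alt, PySem.List.foldl_append_singleton_eq_map]
  exact List.map_congr_left (fun e _ => (pvA_eq_spec e).trans (pvB_eq_spec e).symm)

-- ===== VERDICT (by name: the statement is the Claim_ definition above) =====
theorem remove_prvs_batch_spec : Claim_equal_remove_prvs_batch := by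
  intro emails _
  unfold Spec_remove_prvs_batch
  exact pv_main emails
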